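-- pv_equiv track=rewrite | github.com/MediaMonitoringAndAnalysis/humanitarian-extract-classificator | dataset_creation.py | _clean_lgbt_words
-- ===== SOURCE A (Python) =====
-- from copy import copy
-- from string import punctuation
--
-- def _clean_lgbt_words(text: str) -> str:
--     def lgbt_in_word(word):
--         return "lgbt" in word.lower() or "lgtb" in word.lower()
--
--     def get_one_lgbt_token(word):
--         if word[-1] in punctuation and word[-1] != "+":
--             final_punct = word[-1]
--             word = word[:-1]
--         else:
--             final_punct = ""
--
--         return ("lgbt" + final_punct).rstrip()
--
--     clean_text = copy(text)
--     if lgbt_in_word(clean_text):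
--         clean_text = clean_text.replace(" +", "+")
--         words = clean_text.split(" ")
--         output_text = " ".join(
--             [
--                 one_word if not lgbt_in_word(one_word) else get_one_lgbt_token(one_word)
--                 for one_word in words
--             ]
--         )
--         return output_text
--
--     else:
--         return text
-- ===== SOURCE B (Python) =====
-- from string import punctuation
--
-- def _clean_lgbt_words(text: str) -> str:
--     lowered = text.lower()
--     if "lgbt" not in lowered and "lgtb" not in lowered:
--         return text
--     s = text.replace(" +", "+")
--     out = []
--     i, n = 0, len(s)
--     while i < n:
--         if s[i] == " ":
--             out.append(" ")
--             i += 1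
--             continue
--         j = i
--         while j < n and s[j] != " ":
--             j += 1
--         word = s[i:j]
--         wl = word.lower()
--         if "lgbt" in wl or "lgtb" in wl:
--             last = word[-1]
--             out.append("lgbt" + (last if last in punctuation and last != "+" else ""))
--         else:
--             out.append(word)
--         i = j
--     return "".join(out)
-- ===== Notes on version B (the rewrite author's own statement) =====
-- stated objective: alternative
-- what changed: B replaces A's split-into-a-list / per-word comprehension / join round-trip (plus the no-op rstrip) by a single left-to-right index scan that copies spaces and rewrites each maximal non-space run in place while building the output incrementally.
import Mathlib
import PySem

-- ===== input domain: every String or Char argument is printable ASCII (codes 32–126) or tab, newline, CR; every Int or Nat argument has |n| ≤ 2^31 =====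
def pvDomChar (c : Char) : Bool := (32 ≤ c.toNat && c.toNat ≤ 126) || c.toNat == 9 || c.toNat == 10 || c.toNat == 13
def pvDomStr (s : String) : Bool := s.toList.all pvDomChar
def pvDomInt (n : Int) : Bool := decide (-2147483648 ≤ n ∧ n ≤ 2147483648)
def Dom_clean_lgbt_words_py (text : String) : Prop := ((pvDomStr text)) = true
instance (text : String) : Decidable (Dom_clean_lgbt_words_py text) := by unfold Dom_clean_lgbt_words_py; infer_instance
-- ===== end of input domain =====

-- B replaces A's split-into-list / comprehension / join round-trip by a single left-to-right
-- index scan that rewrites each maximal non-space run in place (objective: alternative).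

-- ===== PORT A =====
-- string.punctuation
def pvPunct : List Char := "!\"#$%&'()*+,-./:;<=>?@[\\]^_`{|}~".toList

-- 'lgbt' in word.lower() or 'lgtb' in word.lower()   (this test appears verbatim in A and in B)
def pvLgbtInWord (w : List Char) : Bool :=
  PySem.Chars.isIn "lgbt".toList (PySem.Chars.lower w) ||
  PySem.Chars.isIn "lgtb".toList (PySem.Chars.lower w)

-- A's get_one_lgbt_token; the Python's 'word = word[:-1]' is dead code (word is never read again)
-- and is dropped; word[-1] on the empty word would be an IndexError, but the caller only passes
-- words containing 'lgbt'/'lgtb', which are nonempty, so the none branch is unreachable.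
def pvTokenA (word : List Char) : List Char :=
  match PySem.List.pyGet? word (-1) with
  | none => []   -- unreachable (Python IndexError)
  | some last =>
    if last ∈ pvPunct ∧ last ≠ '+' then
      PySem.Chars.rstrip ("lgbt".toList ++ [last])
    else
      PySem.Chars.rstrip ("lgbt".toList ++ [])

def clean_lgbt_words_py (text : String) : String :=
  let clean_text := text.toList
  if pvLgbtInWord clean_text then
    let clean_text := PySem.Chars.replace clean_text " +".toList "+".toList
    let words := PySem.Chars.splitOn clean_text " ".toList
    String.ofList (PySem.Chars.join " ".toList
      (words.map (fun one_word => if !pvLgbtInWord one_word then one_word else pvTokenA one_word)))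
  else text

-- ===== PORT B =====
-- Source B's per-word rewrite: "lgbt" + (last if last in punctuation and last != "+" else "")
def pvTokenB (word : List Char) : List Char :=
  match PySem.List.pyGet? word (-1) with
  | none => []   -- unreachable: only called on a nonempty run
  | some last =>
    "lgbt".toList ++ (if last ∈ pvPunct ∧ last ≠ '+' then [last] else [])

-- hand port of Source B's index while-loop (exact: a space is copied as is, otherwise the maximal
-- run s[i:j] of non-space characters is transformed and the scan resumes at j)
def pvScan : List Char → List Char
  | [] => []
  | c :: rest =>
    if c = ' ' then ' ' :: pvScan rest
    else
      let word := c :: rest.takeWhile (· ≠ ' ')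
      let rest' := rest.dropWhile (· ≠ ' ')
      (if pvLgbtInWord word then pvTokenB word else word) ++ pvScan rest'
termination_by l => l.length
decreasing_by
  · simp
  · have := List.length_dropWhile_le (fun c => decide (c ≠ ' ')) rest
    simp only [List.length_cons]
    omega

def clean_lgbt_words_py_alt (text : String) : String :=
  let lowered := PySem.Chars.lower text.toList
  if !PySem.Chars.isIn "lgbt".toList lowered && !PySem.Chars.isIn "lgtb".toList lowered then
    text
  else
    String.ofList (pvScan (PySem.Chars.replace text.toList " +".toList "+".toList))

-- ===== PRECONDITION & SPEC =====
def Spec_clean_lgbt_words_py (text : String) (out : String) : Prop := out = clean_lgbt_words_py_alt text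
instance (text : String) (out : String) : Decidable (Spec_clean_lgbt_words_py text out) := by unfold Spec_clean_lgbt_words_py; infer_instance

-- ===== CLAIM (what is proved, stated in full; the proofs are below) =====
def Claim_equal_clean_lgbt_words_py : Prop := ∀ (text : String), Dom_clean_lgbt_words_py text → Spec_clean_lgbt_words_py text (clean_lgbt_words_py text)

-- ===== LEMMAS AND PROOFS =====

-- the two per-word rewrites agree: A's trailing .rstrip() is a no-op (punctuation is not whitespace)
theorem pvToken_eq (w : List Char) : pvTokenA w = pvTokenB w := by
  unfold pvTokenA pvTokenB
  cases PySem.List.pyGet? w (-1) with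
  | none => rfl
  | some c =>
    dsimp only
    by_cases hp : c ∈ pvPunct ∧ c ≠ '+'
    · have hall : pvPunct.all (fun c => !PySem.Chars.isspace c) = true := by decide
      have hsp : PySem.Chars.isspace c = false := by
        have := List.all_eq_true.mp hall c hp.1
        simpa using this
      rw [if_pos hp, if_pos hp]
      simp [PySem.Chars.rstrip, hsp]
    · rw [if_neg hp, if_neg hp]
      decide

def pvSplit : List Char → List (List Char)
  | [] => [[]]
  | c :: t => if c = ' ' then [] :: pvSplit t else (pvSplit t).modifyHead (c :: ·)

theorem pvSplit_ne_nil (s : List Char) : pvSplit s ≠ [] := by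
  induction s with
  | nil => simp [pvSplit]
  | cons c t ih =>
    simp only [pvSplit]
    split
    · simp
    · cases h : pvSplit t with
      | nil => exact absurd h ih
      | cons a l => simp [List.modifyHead]

theorem pvGo_spec (fuel : Nat) :
    ∀ (l cur : List Char) (acc : List (List Char)), l.length < fuel →
    PySem.Chars.splitOn.go [' '] fuel l cur acc
      = acc.reverse ++ (pvSplit l).modifyHead (fun w => cur.reverse ++ w) := by
  induction fuel with
  | zero => intro l cur acc h; omega
  | succ n ih =>
    intro l cur acc h
    cases l with
    | nil =>
      have hgo : PySem.Chars.splitOn.go [' '] (n+1) [] cur acc = (cur.reverse :: acc).reverse := rfl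
      rw [hgo]
      simp [pvSplit, List.modifyHead]
    | cons c t =>
      have hgo : PySem.Chars.splitOn.go [' '] (n+1) (c :: t) cur acc
          = if [' '].isPrefixOf (c :: t) then
              PySem.Chars.splitOn.go [' '] n (List.drop [' '].length (c :: t)) [] (cur.reverse :: acc)
            else PySem.Chars.splitOn.go [' '] n t (c :: cur) acc := rfl
      rw [hgo]
      obtain ⟨x, xs, hx⟩ : ∃ x xs, pvSplit t = x :: xs := by
        cases h' : pvSplit t with
        | nil => exact absurd h' (pvSplit_ne_nil t)
        | cons a l => exact ⟨a, l, rfl⟩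
      by_cases hc : c = ' '
      · subst hc
        rw [if_pos (by simp [List.isPrefixOf])]
        rw [ih _ _ _ (by simp at h ⊢; omega)]
        simp [pvSplit, hx, List.modifyHead]
      · rw [if_neg (by simp [List.isPrefixOf, Ne.symm hc])]
        rw [ih _ _ _ (by simp at h ⊢; omega)]
        simp [pvSplit, hx, List.modifyHead, hc]

theorem pvSplitOn_eq (s : List Char) : PySem.Chars.splitOn s " ".toList = pvSplit s := by
  have : PySem.Chars.splitOn s " ".toList
      = PySem.Chars.splitOn.go [' '] (s.length + 1) s [] [] := rfl
  rw [this, pvGo_spec (s.length + 1) s [] [] (by omega)]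
  obtain ⟨x, xs, hx⟩ : ∃ x xs, pvSplit s = x :: xs := by
    cases h' : pvSplit s with
    | nil => exact absurd h' (pvSplit_ne_nil s)
    | cons a l => exact ⟨a, l, rfl⟩
  simp [hx, List.modifyHead]

theorem pvSplit_append (w r : List Char) (hw : ∀ c ∈ w, c ≠ ' ') :
    pvSplit (w ++ r) = (pvSplit r).modifyHead (fun x => w ++ x) := by
  induction w with
  | nil =>
    cases h : pvSplit r with
    | nil => simp [h, List.modifyHead]
    | cons a l => simp [h, List.modifyHead]
  | cons a w ih =>
    have ha : a ≠ ' ' := hw a (by simp)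
    have ih' := ih (fun c hc => hw c (by simp [hc]))
    simp only [List.cons_append, pvSplit, ha, ih']
    cases h : pvSplit r with
    | nil => simp [List.modifyHead]
    | cons x xs => simp [List.modifyHead]

theorem pvDropWhile_head {p : Char → Bool} {t u : List Char} {d : Char}
    (h : t.dropWhile p = d :: u) : p d = false := by
  induction t with
  | nil => simp [List.dropWhile] at h
  | cons e t' ih =>
    rw [List.dropWhile_cons] at h
    by_cases hp : p e
    · rw [if_pos hp] at h
      exact ih h
    · rw [if_neg hp] at h
      injection h with h1 h2
      rw [← h1]
      simpa using hp

theorem pvMainAux : ∀ (n : Nat) (s : List Char), s.length ≤ n →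
    PySem.Chars.join " ".toList
      ((pvSplit s).map (fun one_word => if !pvLgbtInWord one_word then one_word else pvTokenA one_word))
      = pvScan s := by
  intro n
  induction n with
  | zero =>
    intro s hs
    have : s = [] := by cases s <;> simp_all
    subst this
    simp [pvSplit, pvScan, PySem.Chars.join_singleton]
    decide
  | succ n ih =>
    intro s hs
    cases s with
    | nil =>
      simp [pvSplit, pvScan, PySem.Chars.join_singleton]
      decide
    | cons c t =>
      by_cases hc : c = ' '
      · subst hc
        obtain ⟨x, xs, hx⟩ : ∃ x xs, pvSplit t = x :: xs := by
          cases h' : pvSplit t with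
          | nil => exact absurd h' (pvSplit_ne_nil t)
          | cons a l => exact ⟨a, l, rfl⟩
        have ht : PySem.Chars.join " ".toList
            ((pvSplit t).map (fun one_word => if !pvLgbtInWord one_word then one_word else pvTokenA one_word))
            = pvScan t := ih t (by simpa using Nat.le_of_succ_le_succ hs)
        rw [show pvScan (' ' :: t) = ' ' :: pvScan t from by simp [pvScan]]
        rw [← ht, show pvSplit (' ' :: t) = [] :: pvSplit t from by simp [pvSplit], hx]
        rw [List.map_cons, List.map_cons]
        rw [show (if !pvLgbtInWord [] then ([] : List Char) else pvTokenA []) = [] from by decide]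
        rw [PySem.Chars.join_cons_cons]
        simp [show " ".toList = [' '] from rfl]
      · -- non-space head: the maximal run
        have hsplit : c :: t = (c :: t.takeWhile (· ≠ ' ')) ++ t.dropWhile (· ≠ ' ') := by
          simp [List.takeWhile_append_dropWhile]
        have hw : ∀ x ∈ c :: t.takeWhile (· ≠ ' '), x ≠ ' ' := by
          intro x hx
          rcases List.mem_cons.mp hx with h | h
          · simpa [h] using hc
          · simpa using List.mem_takeWhile_imp h
        have hscan : pvScan (c :: t)
            = (if pvLgbtInWord (c :: t.takeWhile (· ≠ ' ')) then pvTokenB (c :: t.takeWhile (· ≠ ' '))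
               else c :: t.takeWhile (· ≠ ' ')) ++ pvScan (t.dropWhile (· ≠ ' ')) := by
          rw [pvScan]
          simp [hc]
        have hchunk : (if !pvLgbtInWord (c :: t.takeWhile (· ≠ ' ')) then c :: t.takeWhile (· ≠ ' ')
              else pvTokenA (c :: t.takeWhile (· ≠ ' ')))
            = (if pvLgbtInWord (c :: t.takeWhile (· ≠ ' ')) then pvTokenB (c :: t.takeWhile (· ≠ ' '))
               else c :: t.takeWhile (· ≠ ' ')) := by
          simp only [pvToken_eq]
          cases hb : pvLgbtInWord (c :: t.takeWhile (· ≠ ' ')) <;> simp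
        conv_lhs => rw [hsplit]
        rw [pvSplit_append _ _ hw, hscan]
        cases hr : t.dropWhile (· ≠ ' ') with
        | nil =>
          simp only [pvSplit, List.modifyHead, List.map_cons, List.map_nil, List.append_nil]
          rw [PySem.Chars.join_singleton]
          rw [show pvScan [] = [] from by simp [pvScan], List.append_nil]
          exact hchunk
        | cons d u =>
          have hd : d = ' ' := by
            have := pvDropWhile_head hr
            simpa using this
          subst hd
          have hu : u.length ≤ n := by
            have h1 := List.length_dropWhile_le (fun c => decide (c ≠ ' ')) t
            rw [hr] at h1
            simp at h1 hs
            omega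
          obtain ⟨x, xs, hx⟩ : ∃ x xs, pvSplit u = x :: xs := by
            cases h' : pvSplit u with
            | nil => exact absurd h' (pvSplit_ne_nil u)
            | cons a l => exact ⟨a, l, rfl⟩
          have hui : PySem.Chars.join " ".toList
              ((pvSplit u).map (fun one_word => if !pvLgbtInWord one_word then one_word else pvTokenA one_word))
              = pvScan u := ih u hu
          rw [show pvScan (' ' :: u) = ' ' :: pvScan u from by simp [pvScan]]
          rw [show pvSplit (' ' :: u) = [] :: pvSplit u from by simp [pvSplit], hx]
          rw [List.modifyHead_cons, List.append_nil, List.map_cons, List.map_cons]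
          rw [PySem.Chars.join_cons_cons, hchunk]
          rw [hx] at hui
          simp only [List.map_cons] at hui
          rw [hui]
          simp [show " ".toList = [' '] from rfl]

-- ===== VERDICT (by name: the statement is the Claim_ definition above) =====
theorem clean_lgbt_words_py_spec : Claim_equal_clean_lgbt_words_py := by
  intro text _
  unfold Spec_clean_lgbt_words_py
  simp only [clean_lgbt_words_py, clean_lgbt_words_py_alt]
  by_cases hg : pvLgbtInWord text.toList = true
  · have hB : (!PySem.Chars.isIn "lgbt".toList (PySem.Chars.lower text.toList)
        && !PySem.Chars.isIn "lgtb".toList (PySem.Chars.lower text.toList)) = false := by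
      revert hg
      unfold pvLgbtInWord
      cases PySem.Chars.isIn "lgbt".toList (PySem.Chars.lower text.toList) <;>
        cases PySem.Chars.isIn "lgtb".toList (PySem.Chars.lower text.toList) <;> simp
    rw [if_pos hg, if_neg (by simp only [hB]; decide)]
    rw [pvSplitOn_eq]
    rw [pvMainAux (PySem.Chars.replace text.toList " +".toList "+".toList).length _ le_rfl]
  · have hg' : pvLgbtInWord text.toList = false := by simpa using hg
    have hB : (!PySem.Chars.isIn "lgbt".toList (PySem.Chars.lower text.toList)
        && !PySem.Chars.isIn "lgtb".toList (PySem.Chars.lower text.toList)) = true := by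
      revert hg'
      unfold pvLgbtInWord
      cases PySem.Chars.isIn "lgbt".toList (PySem.Chars.lower text.toList) <;>
        cases PySem.Chars.isIn "lgtb".toList (PySem.Chars.lower text.toList) <;> simp
    rw [if_neg (by simp [hg']), if_pos hB]
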